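-- pv_equiv track=rewrite | github.com/pypi-data/pypi-mirror-367 | packages/zmk-glovebox/zmk_glovebox-0.1.1-py3-none-any.whl/glovebox/layout/utils/layer_references.py | create_layer_mapping_for_remove
-- ===== SOURCE A (Python) =====
-- def create_layer_mapping_for_remove(
--     original_count: int, removed_indices: list[int]
-- ) -> dict[int, int | None]:
--     """Create a layer mapping for removing layers.
--
--     Args:
--         original_count: Number of layers before removal
--         removed_indices: List of indices being removed (must be sorted)
--
--     Returns:
--         Mapping from old indices to new indices (None for removed)
--     """
--     mapping: dict[int, int | None] = {}
--     removed_set = set(removed_indices)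
--     shift = 0
--
--     for i in range(original_count):
--         if i in removed_set:
--             mapping[i] = None
--             shift += 1
--         else:
--             mapping[i] = i - shift
--
--     return mapping
-- ===== SOURCE B (Python) =====
-- def create_layer_mapping_for_remove(
--     original_count: int, removed_indices: list[int]
-- ) -> dict[int, int | None]:
--     """Two-phase rebuild: list the surviving indices, number them by
--     enumeration, then look each old index up (None when absent)."""
--     removed_set = set(removed_indices)
--     kept = [i for i in range(original_count) if i not in removed_set]
--     new_index = {k: idx for idx, k in enumerate(kept)}
--     return {i: new_index.get(i) for i in range(original_count)}
-- ===== Notes on version B (the rewrite author's own statement) =====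
-- stated objective: alternative
-- what changed: Replaces the running shift counter with a two-phase table build: first collect the surviving indices, number them by enumeration into a lookup dict, then map every old index through that dict (get returns None for removed).
import Mathlib
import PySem

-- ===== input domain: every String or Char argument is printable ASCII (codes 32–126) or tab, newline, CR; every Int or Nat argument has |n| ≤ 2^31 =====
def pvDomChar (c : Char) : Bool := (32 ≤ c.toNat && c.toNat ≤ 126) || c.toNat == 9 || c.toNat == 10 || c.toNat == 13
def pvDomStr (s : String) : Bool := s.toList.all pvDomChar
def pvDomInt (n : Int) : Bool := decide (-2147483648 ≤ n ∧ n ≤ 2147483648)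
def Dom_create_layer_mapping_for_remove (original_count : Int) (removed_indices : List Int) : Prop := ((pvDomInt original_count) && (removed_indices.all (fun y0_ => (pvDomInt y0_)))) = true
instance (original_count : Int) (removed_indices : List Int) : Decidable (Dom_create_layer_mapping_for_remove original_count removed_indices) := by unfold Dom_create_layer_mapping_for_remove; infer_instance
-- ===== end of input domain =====

-- B replaces A's running shift counter with a two-phase build (surviving-index
-- table, then enumeration lookup); same cost, different decomposition.

-- ===== PORT A =====
def create_layer_mapping_for_remove (original_count : Int) (removed_indices : List Int) : List (Int × Option Int) :=
  let removed_set : PySem.Set Int := PySem.Set.ofList removed_indices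
  let st := (PySem.List.pyRange 0 original_count 1).foldl
    (fun (st : PySem.Dict Int (Option Int) × Int) i =>
      if PySem.Set.contains removed_set i then (st.1.insert i none, st.2 + 1)
      else (st.1.insert i (some (i - st.2)), st.2))
    (PySem.Dict.empty, 0)
  st.1.items

-- ===== PORT B =====
def create_layer_mapping_for_remove_alt (original_count : Int) (removed_indices : List Int) : List (Int × Option Int) :=
  let removed_set : PySem.Set Int := PySem.Set.ofList removed_indices
  let kept := (PySem.List.pyRange 0 original_count 1).filter
    (fun i => !(PySem.Set.contains removed_set i))
  let new_index : PySem.Dict Int Int :=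
    (PySem.List.enumerate kept 0).foldl (fun d p => d.insert p.2 p.1) PySem.Dict.empty
  ((PySem.List.pyRange 0 original_count 1).foldl
    (fun (m : PySem.Dict Int (Option Int)) i => m.insert i (new_index.get? i))
    PySem.Dict.empty).items

-- ===== PRECONDITION & SPEC =====
def Spec_create_layer_mapping_for_remove (original_count : Int) (removed_indices : List Int) (out : List (Int × Option Int)) : Prop := out = create_layer_mapping_for_remove_alt original_count removed_indices
instance (original_count : Int) (removed_indices : List Int) (out : List (Int × Option Int)) : Decidable (Spec_create_layer_mapping_for_remove original_count removed_indices out) := by unfold Spec_create_layer_mapping_for_remove; infer_instance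

-- ===== CLAIM (what is proved, stated in full; the proofs are below) =====
def Claim_equal_create_layer_mapping_for_remove : Prop := ∀ (original_count : Int) (removed_indices : List Int), Dom_create_layer_mapping_for_remove original_count removed_indices → Spec_create_layer_mapping_for_remove original_count removed_indices (create_layer_mapping_for_remove original_count removed_indices)

-- ===== LEMMAS AND PROOFS =====

-- the value both programs associate with old index i
def pvVal (R : PySem.Set Int) (i : Int) : Option Int :=
  if PySem.Set.contains R i then none
  else some (((PySem.List.pyRange 0 i 1).filter (fun j => !(PySem.Set.contains R j))).length : Int)

-- A's loop invariant: after the first m indices, the dict holds (i, pvVal R i)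
-- for i < m in order and the shift counter counts the removed indices seen.
lemma aLoop_inv (R : PySem.Set Int) (m : Nat) :
    ((PySem.List.pyRange 0 (m : Int) 1).foldl
      (fun (st : PySem.Dict Int (Option Int) × Int) i =>
        if PySem.Set.contains R i then (st.1.insert i none, st.2 + 1)
        else (st.1.insert i (some (i - st.2)), st.2))
      (PySem.Dict.empty, 0)) =
    (PySem.Dict.mk ((PySem.List.pyRange 0 (m : Int) 1).map (fun i => (i, pvVal R i))),
     ((PySem.List.pyRange 0 (m : Int) 1).countP (fun i => PySem.Set.contains R i) : Int)) := by
  induction m with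
  | zero =>
    simp only [Int.natCast_zero, PySem.List.pyRange_zero]
    rfl
  | succ m ih =>
    have hsp : PySem.List.pyRange 0 ((m : Int) + 1) 1
        = PySem.List.pyRange 0 (m : Int) 1 ++ [(m : Int)] :=
      PySem.List.pyRange_one_succ_right (by positivity)
    have hnotmem : ((m : Int), pvVal R (m : Int)) ∉
        (PySem.List.pyRange 0 (m : Int) 1).map (fun i => (i, pvVal R i)) := by
      intro h
      rcases List.mem_map.1 h with ⟨j, hj, hje⟩
      have := (PySem.List.mem_pyRange_one.1 hj).2
      have : (j : Int) = m := congrArg Prod.fst hje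
      omega
    have hcontains :
        (PySem.Dict.mk ((PySem.List.pyRange 0 (m : Int) 1).map (fun i => (i, pvVal R i)))).contains (m : Int) = false := by
      rw [Bool.eq_false_iff]
      intro hc
      have hk := (PySem.Dict.contains_iff_mem_keys _ _).1 hc
      simp only [PySem.Dict.keys, List.map_map] at hk
      rcases List.mem_map.1 hk with ⟨j, hj, hje⟩
      have := (PySem.List.mem_pyRange_one.1 hj).2
      simp at hje
      omega
    push_cast [hsp, List.foldl_append, List.map_append, List.countP_append, ih]
    by_cases hm : PySem.Set.contains R (m : Int) = true
    · have hmR : (m : Int) ∈ R := (PySem.Set.contains_iff _ _).1 hm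
      simp only [List.foldl_cons, List.foldl_nil, if_pos hm]
      rw [Prod.ext_iff]
      refine ⟨?_, ?_⟩
      · apply PySem.Dict.ext
        rw [PySem.Dict.items_insert_of_not_contains _ _ hcontains]
        simp [pvVal, hmR]
      · simp [hmR]
    · have hmR : (m : Int) ∉ R := fun h => hm ((PySem.Set.contains_iff _ _).2 h)
      simp only [List.foldl_cons, List.foldl_nil, if_neg hm]
      rw [Prod.ext_iff]
      refine ⟨?_, ?_⟩
      · apply PySem.Dict.ext
        rw [PySem.Dict.items_insert_of_not_contains _ _ hcontains]
        have hlen : ((PySem.List.pyRange 0 (m : Int) 1).filter (fun j => !(PySem.Set.contains R j))).length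
            + (PySem.List.pyRange 0 (m : Int) 1).countP (fun i => PySem.Set.contains R i) = m := by
          have h1 : (PySem.List.pyRange 0 (m : Int) 1).length
              = (PySem.List.pyRange 0 (m : Int) 1).countP (fun i => PySem.Set.contains R i)
                + (PySem.List.pyRange 0 (m : Int) 1).countP (fun j => !(PySem.Set.contains R j)) := by
            rw [List.length_eq_countP_add_countP (fun i => PySem.Set.contains R i)]
            congr 1
            exact List.countP_congr (by intro x _; simp)
          have h2 : (PySem.List.pyRange 0 (m : Int) 1).length = m := by
            simp [PySem.List.length_pyRange_one]
          rw [← List.countP_eq_length_filter] at *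
          omega
        have harith : ((m : Int))
              - ((PySem.List.pyRange 0 (m : Int) 1).countP (fun i => PySem.Set.contains R i) : Int)
            = (((PySem.List.pyRange 0 (m : Int) 1).filter (fun j => !(PySem.Set.contains R j))).length : Int) := by
          omega
        simp [pvVal, hmR]
        simpa using harith
      · simp [hmR]

-- lookup in the dict built from enumerate(ks, s) over an accumulator d
lemma enum_dict_get? (ks : List Int) (hnd : ks.Nodup) (s : Int)
    (d : PySem.Dict Int Int) (x : Int) :
    ((PySem.List.enumerate ks s).foldl (fun d p => d.insert p.2 p.1) d).get? x =
    if _hx : x ∈ ks then some (s + (List.idxOf x ks : Int)) else d.get? x := by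
  induction ks generalizing s d with
  | nil => simp [PySem.List.enumerate_nil]
  | cons k ks ih =>
    rw [PySem.List.enumerate_cons]
    simp only [List.foldl_cons]
    rcases List.nodup_cons.1 hnd with ⟨hk, hnd'⟩
    rw [ih hnd']
    by_cases hx : x ∈ ks
    · have hxk : x ≠ k := fun h => hk (h ▸ hx)
      rw [dif_pos hx, dif_pos (List.mem_cons_of_mem _ hx)]
      rw [List.idxOf_cons_ne _ (fun h => hxk (h.symm))]
      congr 1
      push_cast
      ring
    · rw [dif_neg hx]
      by_cases hxk : x = k
      · subst hxk
        rw [dif_pos (List.mem_cons_self), List.idxOf_cons_self]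
        simp [PySem.Dict.get?_insert_self]
      · rw [dif_neg (by simp [hxk, hx])]
        exact PySem.Dict.get?_insert_of_ne _ _ hxk

-- for i in range(n) the enumerate-dict lookup gives exactly pvVal
lemma new_index_get (R : PySem.Set Int) (n i : Int) (h0 : 0 ≤ i) (hn : i < n) :
    (((PySem.List.enumerate ((PySem.List.pyRange 0 n 1).filter (fun j => !(PySem.Set.contains R j))) 0).foldl
      (fun d p => d.insert p.2 p.1) (PySem.Dict.empty : PySem.Dict Int Int)).get? i)
    = pvVal R i := by
  set kept := (PySem.List.pyRange 0 n 1).filter (fun j => !(PySem.Set.contains R j)) with hkept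
  have hnd : kept.Nodup := List.Nodup.filter _ (PySem.List.nodup_pyRange_one 0 n)
  rw [enum_dict_get? kept hnd 0 _ i]
  by_cases hm : PySem.Set.contains R i = true
  · have hmR : i ∈ R := (PySem.Set.contains_iff _ _).1 hm
    rw [dif_neg (by simp [hkept, List.mem_filter, hmR])]
    simp [pvVal, hmR]
  · have hmR : i ∉ R := fun h => hm ((PySem.Set.contains_iff _ _).2 h)
    have hsplit : PySem.List.pyRange 0 n 1
        = PySem.List.pyRange 0 i 1 ++ PySem.List.pyRange i n 1 :=
      PySem.List.pyRange_one_append 0 i n h0 (le_of_lt hn)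
    have hcons : PySem.List.pyRange i n 1 = i :: PySem.List.pyRange (i+1) n 1 :=
      PySem.List.pyRange_one_cons hn
    have hkeq : kept = ((PySem.List.pyRange 0 i 1).filter (fun j => !(PySem.Set.contains R j)))
        ++ i :: ((PySem.List.pyRange (i+1) n 1).filter (fun j => !(PySem.Set.contains R j))) := by
      rw [hkept, hsplit, List.filter_append, hcons, List.filter_cons, if_pos (by simp [hmR])]
    have hipre : i ∉ (PySem.List.pyRange 0 i 1).filter (fun j => !(PySem.Set.contains R j)) := by
      intro h
      have := (PySem.List.mem_pyRange_one.1 (List.mem_filter.1 h).1).2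
      omega
    have hmem : i ∈ kept := by rw [hkeq]; exact List.mem_append_right _ List.mem_cons_self
    rw [dif_pos hmem]
    have hidx : List.idxOf i kept
        = ((PySem.List.pyRange 0 i 1).filter (fun j => !(PySem.Set.contains R j))).length := by
      rw [hkeq, List.idxOf_append]
      simp only [if_neg hipre, List.idxOf_cons_self]
      omega
    rw [hidx]
    simp [pvVal, hmR]

-- ===== VERDICT (by name: the statement is the Claim_ definition above) =====
theorem create_layer_mapping_for_remove_spec : Claim_equal_create_layer_mapping_for_remove := by
  intro n rs _
  unfold Spec_create_layer_mapping_for_remove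
  unfold create_layer_mapping_for_remove create_layer_mapping_for_remove_alt
  dsimp only
  set R : PySem.Set Int := PySem.Set.ofList rs with hR
  set NI : PySem.Dict Int Int :=
    (PySem.List.enumerate ((PySem.List.pyRange 0 n 1).filter (fun i => !(PySem.Set.contains R i))) 0).foldl
      (fun d p => d.insert p.2 p.1) PySem.Dict.empty with hNI
  have hBitems : ((PySem.List.pyRange 0 n 1).foldl
      (fun (m : PySem.Dict Int (Option Int)) i => m.insert i (NI.get? i)) PySem.Dict.empty).items
      = (PySem.List.pyRange 0 n 1).map (fun i => (i, NI.get? i)) := by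
    have h := PySem.Dict.items_foldl_insert_fresh (l := PySem.List.pyRange 0 n 1)
      (k := fun i => i) (v := fun i => NI.get? i) (d := PySem.Dict.empty)
      (by intro a _; simp [PySem.Dict.contains_empty])
      (by simpa using PySem.List.nodup_pyRange_one 0 n)
    simpa using h
  by_cases hn : n ≤ 0
  · rw [PySem.List.pyRange_one_eq_nil hn]
    simp
  · rw [not_le] at hn
    have hncast : n = ((n.toNat : Nat) : Int) := by omega
    rw [hBitems]
    rw [hncast]
    rw [aLoop_inv R n.toNat]
    apply List.map_congr_left
    intro i hi
    rcases PySem.List.mem_pyRange_one.1 hi with ⟨h0, hlt⟩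
    have hv := new_index_get R n i h0 (by omega)
    rw [← hNI] at hv
    rw [hv]
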